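-- pv_equiv track=rewrite | github.com/djm3622/Residual-Spectrum-Diagnostic | utils/diagnostics.py | _max_haar_levels
-- ===== SOURCE A (Python) =====
-- def _max_haar_levels(nx: int, ny: int) -> int:
--     levels = 0
--     cur_x = int(nx)
--     cur_y = int(ny)
--     while cur_x >= 2 and cur_y >= 2 and cur_x % 2 == 0 and cur_y % 2 == 0:
--         levels += 1
--         cur_x //= 2
--         cur_y //= 2
--     return levels
-- ===== SOURCE B (Python) =====
-- def _max_haar_levels(nx: int, ny: int) -> int:
--     def _v2(v):
--         v = int(v)
--         if v < 2:
--             return 0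
--         return (v & -v).bit_length() - 1
--     return min(_v2(nx), _v2(ny))
-- ===== Notes on version B (the rewrite author's own statement) =====
-- stated objective: alternative
-- what changed: Replaces A's coupled halving loop by a closed-form per-dimension 2-adic valuation ((v & -v).bit_length() - 1) combined with min.
import Mathlib
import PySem

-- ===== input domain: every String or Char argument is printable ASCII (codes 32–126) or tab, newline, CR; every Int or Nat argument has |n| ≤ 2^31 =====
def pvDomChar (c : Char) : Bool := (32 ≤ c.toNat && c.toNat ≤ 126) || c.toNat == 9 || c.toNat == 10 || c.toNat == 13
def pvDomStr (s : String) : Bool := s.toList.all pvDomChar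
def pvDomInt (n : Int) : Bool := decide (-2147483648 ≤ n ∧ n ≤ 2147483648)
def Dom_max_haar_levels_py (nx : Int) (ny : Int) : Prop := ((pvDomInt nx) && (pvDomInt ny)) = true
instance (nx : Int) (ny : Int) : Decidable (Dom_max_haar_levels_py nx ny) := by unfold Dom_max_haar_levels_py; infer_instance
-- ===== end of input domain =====

-- B replaces A's coupled halving loop by a closed-form per-dimension 2-adic valuation (lowest set bit) combined with min (objective: alternative).

-- ===== PORT A =====
-- the while loop of A as structural recursion on the same state (cur_x, cur_y, levels)
def haarLoop (cx : Int) (cy : Int) (levels : Int) : Int :=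
  if 2 ≤ cx ∧ 2 ≤ cy ∧ PySem.Int.mod cx 2 = 0 ∧ PySem.Int.mod cy 2 = 0 then
    haarLoop (PySem.Int.floordiv cx 2) (PySem.Int.floordiv cy 2) (levels + 1)
  else levels
termination_by cx.toNat
decreasing_by
  rw [PySem.Int.floordiv_eq_ediv_of_pos (by omega)]
  omega

def max_haar_levels_py (nx : Int) (ny : Int) : Int := haarLoop nx ny 0

-- ===== PORT B =====
-- _v2 of Source B: (v & -v).bit_length() - 1, guarded by v < 2
def haarV2 (v : Int) : Int :=
  if v < 2 then 0
  else (PySem.Int.bitLength (PySem.Int.band v (-v)) : Int) - 1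

def max_haar_levels_py_alt (nx : Int) (ny : Int) : Int := min (haarV2 nx) (haarV2 ny)

-- ===== PRECONDITION & SPEC =====
def Spec_max_haar_levels_py (nx : Int) (ny : Int) (out : Int) : Prop := out = max_haar_levels_py_alt nx ny
instance (nx : Int) (ny : Int) (out : Int) : Decidable (Spec_max_haar_levels_py nx ny out) := by unfold Spec_max_haar_levels_py; infer_instance

-- ===== CLAIM (what is proved, stated in full; the proofs are below) =====
def Claim_equal_max_haar_levels_py : Prop := ∀ (nx : Int) (ny : Int), Dom_max_haar_levels_py nx ny → Spec_max_haar_levels_py nx ny (max_haar_levels_py nx ny)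

-- ===== LEMMAS AND PROOFS =====

-- proof-side helper: number of joint halvings available in one dimension (2-adic valuation cut off below 2)
def nv2 (m : Nat) : Nat :=
  if 2 ≤ m ∧ m % 2 = 0 then nv2 (m / 2) + 1 else 0
termination_by m
decreasing_by omega

lemma nv2_eq_zero {m : Nat} (h : ¬ (2 ≤ m ∧ m % 2 = 0)) : nv2 m = 0 := by
  rw [nv2, if_neg h]

lemma nv2_step {m : Nat} (h : 2 ≤ m ∧ m % 2 = 0) : nv2 m = nv2 (m / 2) + 1 := by
  rw [nv2, if_pos h]

lemma land_odd_even (a b : Nat) : (2*a+1) &&& (2*b) = 2*(a &&& b) := by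
  have h : ∀ c : Nat, (c*2+1)/2 = c := fun c => by omega
  apply Nat.eq_of_testBit_eq; intro i
  simp only [Nat.testBit_and]
  cases i <;> simp [Nat.testBit_succ, Nat.testBit_zero, Nat.testBit_and, Nat.mul_comm 2, h]

lemma land_even_odd (a b : Nat) : (2*a) &&& (2*b+1) = 2*(a &&& b) := by
  have h : ∀ c : Nat, (c*2+1)/2 = c := fun c => by omega
  apply Nat.eq_of_testBit_eq; intro i
  simp only [Nat.testBit_and]
  cases i <;> simp [Nat.testBit_succ, Nat.testBit_zero, Nat.testBit_and, Nat.mul_comm 2, h]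

-- m - (m &&& (m-1)) is the lowest set bit, i.e. 2 ^ nv2 m, for m ≥ 1
lemma sub_land_pred (m : Nat) (hm : 1 ≤ m) : m - (m &&& (m-1)) = 2 ^ nv2 m := by
  induction m using Nat.strong_induction_on with
  | _ m ih =>
    rcases Nat.even_or_odd m with he | ho
    · obtain ⟨k, hk⟩ := he
      have hk2 : m = 2 * k := by omega
      have hk1 : 1 ≤ k := by omega
      have hpred : m - 1 = 2*(k-1)+1 := by omega
      have hland : m &&& (m-1) = 2*(k &&& (k-1)) := by
        rw [hpred, hk2, land_even_odd]
      have hle : k &&& (k-1) ≤ k := Nat.and_le_left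
      have ihk := ih k (by omega) hk1
      rw [hland, nv2_step ⟨by omega, by omega⟩, hk2,
        show (2*k)/2 = k from by omega, pow_succ]
      omega
    · obtain ⟨k, hk⟩ := ho
      have hpred : m - 1 = 2*k := by omega
      have hland : m &&& (m-1) = 2*(k &&& k) := by
        rw [hpred, hk, land_odd_even]
      have : m - (m &&& (m-1)) = 1 := by
        simp only [hland, Nat.and_self]; omega
      rw [this, nv2_eq_zero (by omega), pow_zero]

-- band v (-v) = 2 ^ nv2 v.toNat for v ≥ 1
lemma band_neg_self (v : Int) (hv : 1 ≤ v) : PySem.Int.band v (-v) = ((2 ^ nv2 v.toNat : Nat) : Int) := by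
  have h1 : (0:Int) ≤ v := by omega
  have h2 : ¬ (0:Int) ≤ -v := by omega
  rw [PySem.Int.band, if_pos h1, if_neg h2]
  have h3 : (-(-v) - 1).toNat = v.toNat - 1 := by omega
  rw [h3, sub_land_pred v.toNat (by omega)]

lemma bitLength_two_pow (k : Nat) : PySem.Int.bitLength ((2^k : Nat) : Int) = k + 1 := by
  induction k with
  | zero => decide
  | succ k ih =>
    have hpos : (0:Int) < ((2^(k+1) : Nat) : Int) := by positivity
    rw [PySem.Int.bitLength_of_pos hpos, PySem.Int.floordiv_eq_ediv_of_pos (by omega)]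
    have h2 : ((2^(k+1) : Nat) : Int) = 2 * ((2^k : Nat) : Int) := by push_cast; ring
    rw [h2, Int.mul_ediv_cancel_left _ (by omega), ih]

lemma haarV2_eq (v : Int) : haarV2 v = (nv2 v.toNat : Int) := by
  unfold haarV2
  by_cases h : v < 2
  · rw [if_pos h, nv2_eq_zero (by omega)]; rfl
  · rw [if_neg h, band_neg_self v (by omega), bitLength_two_pow]
    omega

lemma haarLoop_eq (cx cy l : Int) : haarLoop cx cy l = l + ((min (nv2 cx.toNat) (nv2 cy.toNat) : Nat) : Int) := by
  induction cx, cy, l using haarLoop.induct with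
  | case1 cx cy l h ih =>
    obtain ⟨hx2, hy2, hxm, hym⟩ := h
    rw [haarLoop, if_pos ⟨hx2, hy2, hxm, hym⟩, ih]
    rw [PySem.Int.mod_eq_emod_of_pos (by omega)] at hxm hym
    rw [PySem.Int.floordiv_eq_ediv_of_pos (by omega), PySem.Int.floordiv_eq_ediv_of_pos (by omega)]
    have ex : (cx / 2).toNat = cx.toNat / 2 := by omega
    have ey : (cy / 2).toNat = cy.toNat / 2 := by omega
    rw [ex, ey, nv2_step (m := cx.toNat) ⟨by omega, by omega⟩,
        nv2_step (m := cy.toNat) ⟨by omega, by omega⟩]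
    have : min (nv2 (cx.toNat / 2) + 1) (nv2 (cy.toNat / 2) + 1)
         = min (nv2 (cx.toNat / 2)) (nv2 (cy.toNat / 2)) + 1 := by omega
    rw [this]; push_cast; ring
  | case2 cx cy l h =>
    rw [haarLoop, if_neg h]
    have hz : nv2 cx.toNat = 0 ∨ nv2 cy.toNat = 0 := by
      by_cases hx2 : 2 ≤ cx
      · by_cases hy2 : 2 ≤ cy
        · by_cases hxm : PySem.Int.mod cx 2 = 0
          · have hym : ¬ PySem.Int.mod cy 2 = 0 := fun hc => h ⟨hx2, hy2, hxm, hc⟩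
            rw [PySem.Int.mod_eq_emod_of_pos (by omega)] at hym
            exact Or.inr (nv2_eq_zero (by omega))
          · rw [PySem.Int.mod_eq_emod_of_pos (by omega)] at hxm
            exact Or.inl (nv2_eq_zero (by omega))
        · exact Or.inr (nv2_eq_zero (by omega))
      · exact Or.inl (nv2_eq_zero (by omega))
    rcases hz with hz | hz <;> simp [hz]

-- ===== VERDICT (by name: the statement is the Claim_ definition above) =====
theorem max_haar_levels_py_spec : Claim_equal_max_haar_levels_py := by
  intro nx ny _
  unfold Spec_max_haar_levels_py max_haar_levels_py max_haar_levels_py_alt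
  rw [haarLoop_eq, haarV2_eq, haarV2_eq]
  push_cast
  omega
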